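-- pv_equiv track=rewrite | github.com/EBI-Metagenomics/genomes-catalogue-pipeline | bin/add_hypothetical_protein_descriptions.py | replace_commas
-- ===== SOURCE A (Python) =====
-- def is_comma_surrounded_by_digits(text):
--     for i in range(1, len(text) - 1):
--         if text[i] == "," and text[i - 1].isdigit() and text[i + 1].isdigit():
--             return True
--     return False
--
-- def replace_commas(input_string):
--     if "," not in input_string:
--         # If there are no commas, do nothing
--         return input_string
--     result = ""
--     i = 0
--     while i < len(input_string):
--         if input_string[i] == ",":
--             if is_comma_surrounded_by_digits(input_string[i - 1 : i + 2]):
--                 result += "%2C"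
--             else:
--                 result += "/"
--             i += 1  # Skip the next character as it's already processed
--         else:
--             result += input_string[i]
--             i += 1
--     return result
-- ===== SOURCE B (Python) =====
-- def replace_commas(input_string):
--     parts = input_string.split(",")
--     pieces = [parts[0]]
--     for prev, cur in zip(parts, parts[1:]):
--         if prev and prev[-1].isdigit() and cur and cur[0].isdigit():
--             pieces.append("%2C")
--         else:
--             pieces.append("/")
--         pieces.append(cur)
--     return "".join(pieces)
-- ===== Notes on version B (the rewrite author's own statement) =====
-- stated objective: idiomatic
-- what changed: A scans the string index by index, re-slicing a 3-character window and re-running a helper scan at every comma; B splits the string on commas once and joins the parts with a per-boundary separator chosen from the last/first characters of the adjacent parts.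
import Mathlib
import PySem

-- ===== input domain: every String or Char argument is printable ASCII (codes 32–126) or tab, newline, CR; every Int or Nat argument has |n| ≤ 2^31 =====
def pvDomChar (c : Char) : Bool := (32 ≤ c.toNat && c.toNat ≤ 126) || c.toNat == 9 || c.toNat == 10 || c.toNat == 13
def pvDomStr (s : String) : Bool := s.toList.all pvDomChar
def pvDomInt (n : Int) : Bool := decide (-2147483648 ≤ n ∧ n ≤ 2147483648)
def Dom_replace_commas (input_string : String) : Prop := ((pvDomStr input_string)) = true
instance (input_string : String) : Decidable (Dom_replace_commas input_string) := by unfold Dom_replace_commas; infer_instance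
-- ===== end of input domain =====

-- B replaces A's index-by-index scan (which re-checks a 3-char slice with a helper at every
-- comma) by split-on-comma and join with a per-boundary separator; objective: idiomatic.

-- ===== PORT A =====
-- 'for i in range(1, len(text)-1): … return True' over a pure predicate ≡ any over the range
def is_comma_surrounded_by_digits (text : List Char) : Bool :=
  (PySem.List.pyRange 1 (PySem.List.len text - 1) 1).any (fun i =>
    PySem.List.pyGetD text i ' ' == ',' &&
    PySem.Chars.isdigit (PySem.List.pyGetD text (i - 1) ' ') &&
    PySem.Chars.isdigit (PySem.List.pyGetD text (i + 1) ' '))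

-- the while-loop of A: index i, accumulator result
def replaceCommasGo (s : List Char) (i : Nat) (result : List Char) : List Char :=
  if h : i < s.length then
    if s[i] = ',' then
      if is_comma_surrounded_by_digits
          (PySem.List.slice s (some ((i : Int) - 1)) (some ((i : Int) + 2))) then
        replaceCommasGo s (i + 1) (result ++ "%2C".toList)
      else
        replaceCommasGo s (i + 1) (result ++ ['/'])
    else
      replaceCommasGo s (i + 1) (result ++ [s[i]])
  else result
termination_by s.length - i

def replace_commas (input_string : String) : String :=
  if PySem.Str.isIn "," input_string then
    String.ofList (replaceCommasGo input_string.toList 0 [])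
  else input_string

-- ===== PORT B =====
-- 'prev and prev[-1].isdigit() and cur and cur[0].isdigit()'
def pvSepDigits (prev cur : List Char) : Bool :=
  (match prev.getLast? with | some c => PySem.Chars.isdigit c | none => false) &&
  (match cur.head? with | some c => PySem.Chars.isdigit c | none => false)

def replace_commas_alt (input_string : String) : String :=
  let parts := PySem.Chars.splitOn input_string.toList [',']
  let pieces := (parts.zip parts.tail).foldl
    (fun pcs pr =>
      pcs ++ [(if pvSepDigits pr.1 pr.2 then "%2C".toList else ['/']), pr.2])
    [parts.headD []]
  String.ofList (PySem.Chars.join [] pieces)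

-- ===== PRECONDITION & SPEC =====
def Spec_replace_commas (input_string : String) (out : String) : Prop := out = replace_commas_alt input_string
instance (input_string : String) (out : String) : Decidable (Spec_replace_commas input_string out) := by unfold Spec_replace_commas; infer_instance

-- ===== CLAIM (what is proved, stated in full; the proofs are below) =====
def Claim_equal_replace_commas : Prop := ∀ (input_string : String), Dom_replace_commas input_string → Spec_replace_commas input_string (replace_commas input_string)

-- ===== LEMMAS AND PROOFS =====

-- reference function both ports are reduced to: one pass carrying the digit-ness of the
-- previous character
def headDigit (l : List Char) : Bool :=
  match l.head? with | some c => PySem.Chars.isdigit c | none => false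

def lastDigit (l : List Char) : Bool :=
  match l.getLast? with | some c => PySem.Chars.isdigit c | none => false

def specGo (pd : Bool) : List Char → List Char
  | [] => []
  | c :: rest =>
    if c = ',' then
      (if pd && headDigit rest then "%2C".toList else ['/']) ++ specGo false rest
    else c :: specGo (PySem.Chars.isdigit c) rest

-- structural split on ','
def split1 : List Char → List (List Char)
  | [] => [[]]
  | c :: rest =>
    if c = ',' then [] :: split1 rest
    else match split1 rest with
      | [] => [[c]]
      | p :: ps => (c :: p) :: ps

-- digit-ness of the character before position i (false at i = 0)
def pdAt (s : List Char) (i : Nat) : Bool :=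
  if h : 0 < i ∧ i ≤ s.length then PySem.Chars.isdigit (s[i - 1]'(by omega)) else false

-- B's separator-and-part renderer, recursively
def renderTail : List Char → List (List Char) → List Char
  | _, [] => []
  | p, q :: rest =>
      (if pvSepDigits p q then "%2C".toList else ['/']) ++ q ++ renderTail q rest

theorem split1_ne_nil (l : List Char) : split1 l ≠ [] := by
  cases l with
  | nil => simp [split1]
  | cons c rest =>
    simp only [split1]
    split
    · simp
    · split <;> simp_all

theorem go_comma (l : List Char) : ∀ (fuel : Nat) (cur : List Char) (acc : List (List Char)),
    l.length ≤ fuel →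
    PySem.Chars.splitOn.go [','] fuel l cur acc =
      acc.reverse ++ (match split1 l with
        | [] => [cur.reverse]
        | p :: ps => (cur.reverse ++ p) :: ps) := by
  induction l with
  | nil =>
    intro fuel cur acc _
    cases fuel <;> simp [PySem.Chars.splitOn.go, split1]
  | cons c rest ih =>
    intro fuel cur acc hf
    cases fuel with
    | zero => simp at hf
    | succ f =>
      rw [PySem.Chars.splitOn.go]
      by_cases hc : c = ','
      · subst hc
        have hpre : [','].isPrefixOf (',' :: rest) = true := by simp [List.isPrefixOf]
        rw [if_pos hpre]
        simp only [List.length_singleton, List.drop_one, List.tail_cons]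
        rw [ih f [] (cur.reverse :: acc) (by simpa using hf)]
        cases hsp : split1 rest with
        | nil => exact absurd hsp (split1_ne_nil rest)
        | cons p ps => simp [split1, hsp]
      · have hpre : [','].isPrefixOf (c :: rest) = false := by
          simp [List.isPrefixOf]
          intro h; exact absurd h.symm hc
        rw [if_neg (by simp [hpre])]
        rw [ih f (c :: cur) acc (by simpa using hf)]
        cases hsp : split1 rest with
        | nil => exact absurd hsp (split1_ne_nil rest)
        | cons p ps => simp [split1, hsp, hc]

theorem splitOn_comma (l : List Char) : PySem.Chars.splitOn l [','] = split1 l := by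
  rw [PySem.Chars.splitOn, go_comma l (l.length + 1) [] [] (by omega)]
  cases hsp : split1 l with
  | nil => exact absurd hsp (split1_ne_nil l)
  | cons p ps => simp

theorem specGo_no_comma (l : List Char) : ∀ (pd : Bool), ',' ∉ l → specGo pd l = l := by
  induction l with
  | nil => intro pd _; rfl
  | cons c rest ih =>
    intro pd h
    simp only [List.mem_cons, not_or] at h
    simp [specGo, Ne.symm h.1, ih _ h.2]

-- first char of the first part of split1 l has digit-ness headDigit l, unless l starts with ','
theorem headDigit_split1 (l : List Char) (p : List Char) (ps : List (List Char))
    (hsp : split1 l = p :: ps) (h : l.head? ≠ some ',') :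
    (match p.head? with | some c => PySem.Chars.isdigit c | none => false) = headDigit l := by
  cases l with
  | nil => simp [split1] at hsp; simp [hsp.1.symm, headDigit]
  | cons c rest =>
    simp only [List.head?_cons] at h
    have hc : ¬ c = ',' := by intro hh; exact h (by rw [hh])
    simp only [split1, if_neg hc] at hsp
    cases hsp2 : split1 rest with
    | nil => exact absurd hsp2 (split1_ne_nil rest)
    | cons q qs =>
      rw [hsp2] at hsp
      cases hsp
      simp [headDigit]

-- B's renderer over split1 computes specGo
theorem specGo_render (l : List Char) : ∀ (cur : List Char),
    cur ++ specGo (lastDigit cur) l =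
      (match split1 l with
       | [] => cur
       | p :: ps => (cur ++ p) ++ renderTail (cur ++ p) ps) := by
  induction l with
  | nil => intro cur; simp [split1, specGo, renderTail]
  | cons c rest ih =>
    intro cur
    by_cases hc : c = ','
    · subst hc
      simp only [split1]
      cases hsp : split1 rest with
      | nil => exact absurd hsp (split1_ne_nil rest)
      | cons p ps =>
        have h2 : specGo false rest = p ++ renderTail p ps := by
          have := ih []
          rw [hsp] at this
          simpa [lastDigit] using this
        have hsep : pvSepDigits cur p =
            ((match cur.getLast? with | some c => PySem.Chars.isdigit c | none => false)
              && headDigit rest) := by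
          unfold pvSepDigits
          by_cases hr : rest.head? = some ','
          · cases rest with
            | nil => simp at hr
            | cons d ds =>
              simp only [List.head?_cons, Option.some.injEq] at hr
              subst hr
              simp only [split1] at hsp
              cases hsp
              simp [headDigit, PySem.Chars.isdigit]
          · rw [headDigit_split1 rest p ps hsp hr]
        simp [specGo, renderTail, h2, hsep, lastDigit]
    · simp only [split1, if_neg hc]
      cases hsp : split1 rest with
      | nil => exact absurd hsp (split1_ne_nil rest)
      | cons p ps =>
        have := ih (cur ++ [c])
        rw [hsp] at this
        simp only [specGo, if_neg hc]
        have hl : lastDigit (cur ++ [c]) = PySem.Chars.isdigit c := by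
          simp [lastDigit]
        rw [hl] at this
        calc cur ++ c :: specGo (PySem.Chars.isdigit c) rest
            = (cur ++ [c]) ++ specGo (PySem.Chars.isdigit c) rest := by simp
          _ = (cur ++ [c] ++ p) ++ renderTail (cur ++ [c] ++ p) ps := this
          _ = _ := by simp

theorem join0_flatten : ∀ (xs : List (List Char)), PySem.Chars.join [] xs = xs.flatten := by
  intro xs
  induction xs with
  | nil => rfl
  | cons x xs ih =>
    cases xs with
    | nil => simp [PySem.Chars.join, List.intercalate]
    | cons y ys =>
      rw [PySem.Chars.join_cons_cons, ih]
      simp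

-- the foldl in B computes renderTail
theorem foldB : ∀ (ps : List (List Char)) (p : List Char) (acc : List (List Char)),
    (((p :: ps).zip ps).foldl
      (fun pcs pr =>
        pcs ++ [(if pvSepDigits pr.1 pr.2 then "%2C".toList else ['/']), pr.2]) acc).flatten
    = acc.flatten ++ renderTail p ps := by
  intro ps
  induction ps with
  | nil => intro p acc; simp [renderTail]
  | cons q qs ih =>
    intro p acc
    simp only [List.zip_cons_cons, List.foldl_cons]
    rw [ih q]
    simp [renderTail]

theorem pyRange_one_empty (b : Int) (h : b ≤ 1) : PySem.List.pyRange 1 b 1 = [] := by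
  simp [PySem.List.pyRange, not_lt.mpr h]

theorem is_comma_short (text : List Char) (h : text.length ≤ 2) :
    is_comma_surrounded_by_digits text = false := by
  unfold is_comma_surrounded_by_digits
  rw [PySem.List.len_eq, pyRange_one_empty _ (by omega)]
  rfl

theorem is_comma_three (a d : Char) :
    is_comma_surrounded_by_digits [a, ',', d]
      = (PySem.Chars.isdigit a && PySem.Chars.isdigit d) := by
  unfold is_comma_surrounded_by_digits
  rw [PySem.List.len_eq]
  rw [show (([a, ',', d].length : Int)) - 1 = 2 from by simp]
  rw [show PySem.List.pyRange 1 2 1 = [1] from by decide]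
  simp [pysem]

theorem comma_check (s : List Char) (i : Nat) (hi : i < s.length) (hc : s[i] = ',') :
    is_comma_surrounded_by_digits
        (PySem.List.slice s (some ((i : Int) - 1)) (some ((i : Int) + 2)))
      = (pdAt s i && headDigit (s.drop (i + 1))) := by
  by_cases h0 : i = 0
  · subst h0
    rw [show (((0 : Nat) : Int) - 1) = -1 from by norm_num,
        show (((0 : Nat) : Int) + 2) = 2 from by norm_num]
    have hlen : (PySem.List.slice s (some (-1)) (some 2)).length ≤ 2 := by
      rw [PySem.List.length_slice]
      have h1 : PySem.List.clampIdx s.length (-1) = s.length - 1 := PySem.List.clampIdx_neg_one _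
      have h2 : PySem.List.clampIdx s.length 2 ≤ s.length := by
        have := PySem.List.clampIdx_le (n := s.length) (i := 2)
        omega
      omega
    rw [is_comma_short _ hlen]
    simp [pdAt]
  · have h1 : 0 < i := Nat.pos_of_ne_zero h0
    have e1 : ((i : Int) - 1) = ((i - 1 : Nat) : Int) := by omega
    have e2 : ((i : Int) + 2) = ((i + 2 : Nat) : Int) := by omega
    rw [e1, e2, PySem.List.slice_natCast, show i + 2 - (i - 1) = 3 from by omega]
    have hd0 : s.drop (i - 1) = s[i - 1]'(by omega) :: s.drop i := by
      rw [List.drop_eq_getElem_cons (by omega : i - 1 < s.length)]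
      rw [show i - 1 + 1 = i from by omega]
    have hd1 : s.drop i = ',' :: s.drop (i + 1) := by
      rw [List.drop_eq_getElem_cons hi, hc]
    rw [hd0, hd1]
    have hpd : pdAt s i = PySem.Chars.isdigit (s[i - 1]'(by omega)) := by
      simp [pdAt, h1, Nat.le_of_lt hi]
    cases hrest : s.drop (i + 1) with
    | nil =>
      rw [is_comma_short _ (by simp)]
      simp [headDigit]
    | cons d ds =>
      have : List.take 3 (s[i - 1] :: ',' :: d :: ds) = [s[i - 1], ',', d] := by simp
      rw [this, is_comma_three, hpd]
      simp [headDigit]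

-- A's loop computes specGo
theorem goA (s : List Char) : ∀ (l : List Char) (i : Nat) (res : List Char), s.drop i = l →
    replaceCommasGo s i res = res ++ specGo (pdAt s i) l := by
  intro l
  induction l with
  | nil =>
    intro i res h
    have hge : s.length ≤ i := by
      rw [List.drop_eq_nil_iff] at h
      omega
    rw [replaceCommasGo, dif_neg (by omega)]
    simp [specGo]
  | cons c rest ih =>
    intro i res h
    have hi : i < s.length := by
      by_contra hn
      rw [List.drop_eq_nil_of_le (by omega)] at h
      simp at h
    have hci : s[i] = c := by
      have : (s.drop i)[0]'(by rw [h]; simp) = c := by simp [h]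
      simpa using this
    have hrest : s.drop (i + 1) = rest := by
      have : (s.drop i).tail = rest := by rw [h]; rfl
      rwa [List.tail_drop] at this
    have hpd1 : pdAt s (i + 1) = PySem.Chars.isdigit c := by
      simp [pdAt, Nat.succ_le_of_lt hi, hci]
    rw [replaceCommasGo, dif_pos hi]
    by_cases hc : c = ','
    · rw [if_pos (by rw [hci, hc])]
      rw [comma_check s i hi (by rw [hci, hc]), hrest]
      rw [ih (i + 1) (res ++ "%2C".toList) hrest, ih (i + 1) (res ++ ['/']) hrest, hpd1, hc]
      have : PySem.Chars.isdigit ',' = false := by decide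
      rw [this]
      simp only [specGo]
      split_ifs <;> simp
    · rw [if_neg (by rw [hci]; exact hc)]
      rw [ih (i + 1) _ hrest, hpd1]
      simp only [specGo, if_neg hc, hci]
      simp

-- B computes specGo from the start state
theorem altB (s : String) : replace_commas_alt s = String.ofList (specGo false s.toList) := by
  unfold replace_commas_alt
  rw [splitOn_comma]
  cases hsp : split1 s.toList with
  | nil => exact absurd hsp (split1_ne_nil _)
  | cons p ps =>
    simp only [List.headD_cons, List.tail_cons]
    rw [join0_flatten, foldB ps p [p]]
    have := specGo_render s.toList []
    rw [hsp] at this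
    simp only [List.nil_append] at this
    rw [show lastDigit [] = false from rfl] at this
    simp only [List.flatten_cons, List.flatten_nil, List.append_nil]
    rw [← this]

-- ===== VERDICT (by name: the statement is the Claim_ definition above) =====
theorem replace_commas_spec : Claim_equal_replace_commas := by
  unfold Claim_equal_replace_commas Spec_replace_commas
  intro s _
  rw [altB]
  unfold replace_commas
  by_cases hin : PySem.Str.isIn "," s = true
  · rw [if_pos hin]
    congr 1
    have := goA s.toList s.toList 0 [] (by simp)
    rw [show pdAt s.toList 0 = false from by simp [pdAt]] at this
    simpa using this
  · rw [if_neg hin]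
    have hnc : ',' ∉ s.toList := by
      intro hm
      exact hin (by
        rw [PySem.Str.isIn_iff_infix]
        exact (List.singleton_infix_iff _ _).mpr hm)
    rw [specGo_no_comma _ _ hnc, String.ofList_toList]
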